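-- pv_equiv track=rewrite | github.com/IvanSh-Hub/Leson_3 | Lesson_3_5.py | fullFibo
-- ===== SOURCE A (Python) =====
-- def fullFibo(n):
--     list1 = []
--     list2 = []
--
--     f0 = 0
--     f1 = f2 = rf1 = 1
--     rf2 = -1
--     list1.extend([f0, f1, f2])
--     list2.extend([rf1, rf2])
--     for i in range(n-1):
--         f1, f2 = f2, f1 + f2
--         rf1, rf2 = rf2, rf1 - rf2
--         list1.append(f2)
--         list2.append(rf2)
--     return list(reversed(list2)) + list1
-- ===== SOURCE B (Python) =====
-- def fullFibo(n):
--     # Build one forward Fibonacci list and derive the negative half by the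
--     # sign identity: F at negative index k equals F(k) for odd k, -F(k) for even k, instead of a second recurrence.
--     m = max(n - 1, 0)
--     a, b = 0, 1
--     fib = [0, 1]
--     for _ in range(m + 1):
--         a, b = b, a + b
--         fib.append(b)
--     neg = [x if k % 2 else -x for k, x in enumerate(fib)]
--     return list(reversed(neg[1:])) + fib
-- ===== Notes on version B (the rewrite author's own statement) =====
-- stated objective: alternative
-- what changed: B runs a single forward Fibonacci recurrence and derives the whole negative half from it via the sign identity (F at negative index k is F(k) for odd k, -F(k) for even k), instead of A's second backwards recurrence maintained in parallel inside the loop.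
import Mathlib
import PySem

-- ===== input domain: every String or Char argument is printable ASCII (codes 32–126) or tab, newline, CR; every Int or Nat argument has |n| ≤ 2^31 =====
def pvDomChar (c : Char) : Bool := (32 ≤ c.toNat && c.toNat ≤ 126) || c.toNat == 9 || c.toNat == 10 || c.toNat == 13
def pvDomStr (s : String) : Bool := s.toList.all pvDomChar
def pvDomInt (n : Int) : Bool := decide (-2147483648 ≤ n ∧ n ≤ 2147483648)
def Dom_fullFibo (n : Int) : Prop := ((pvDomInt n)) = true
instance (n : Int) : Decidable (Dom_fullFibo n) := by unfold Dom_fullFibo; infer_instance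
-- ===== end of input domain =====

-- B builds one forward Fibonacci list and derives the negative half by the sign
-- identity F(minus k) = F(k) for odd k and -F(k) for even k, replacing A's second reverse recurrence
-- (objective: simpler/alternative decomposition, same cost).

-- ===== PORT A =====
def fullFibo (n : Int) : List Int :=
  -- state = (f1, f2, rf1, rf2, list1, list2); list1/list2 start extended as in A
  let st := (PySem.List.pyRange 0 (n - 1) 1).foldl
    (fun (s : Int × Int × Int × Int × List Int × List Int) _ =>
      (s.2.1, s.1 + s.2.1, s.2.2.2.1, s.2.2.1 - s.2.2.2.1,
       s.2.2.2.2.1 ++ [s.1 + s.2.1], s.2.2.2.2.2 ++ [s.2.2.1 - s.2.2.2.1]))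
    (1, 1, 1, -1, [0, 1, 1], [1, -1])
  st.2.2.2.2.2.reverse ++ st.2.2.2.2.1

-- ===== PORT B =====
def fullFibo_alt (n : Int) : List Int :=
  let m : Nat := (max (n - 1) 0).toNat        -- m = max(n - 1, 0)
  let st := (List.range (m + 1)).foldl        -- state = (a, b, fib)
    (fun (s : Int × Int × List Int) _ => (s.2.1, s.1 + s.2.1, s.2.2 ++ [s.1 + s.2.1]))
    (0, 1, [0, 1])
  let fib := st.2.2
  let neg := (PySem.List.enumerate fib 0).map
    (fun p => if PySem.Int.mod p.1 2 = 1 then p.2 else -p.2)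
  (neg.drop 1).reverse ++ fib

-- ===== PRECONDITION & SPEC =====
def Spec_fullFibo (n : Int) (out : List Int) : Prop := out = fullFibo_alt n
instance (n : Int) (out : List Int) : Decidable (Spec_fullFibo n out) := by unfold Spec_fullFibo; infer_instance

-- ===== CLAIM (what is proved, stated in full; the proofs are below) =====
def Claim_equal_fullFibo : Prop := ∀ (n : Int), Dom_fullFibo n → Spec_fullFibo n (fullFibo n)

-- ===== LEMMAS AND PROOFS =====

/-- Fibonacci numbers as integers. -/
def fibI : Nat → Int
  | 0 => 0
  | 1 => 1
  | k + 2 => fibI k + fibI (k + 1)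

/-- Sign of the negative-index Fibonacci identity: F(-k) = sg k (F k). -/
def sg (k : Nat) (x : Int) : Int := if k % 2 = 1 then x else -x

def gA (s : Int × Int × Int × Int × List Int × List Int) :
    Int × Int × Int × Int × List Int × List Int :=
  (s.2.1, s.1 + s.2.1, s.2.2.2.1, s.2.2.1 - s.2.2.2.1,
   s.2.2.2.2.1 ++ [s.1 + s.2.1], s.2.2.2.2.2 ++ [s.2.2.1 - s.2.2.2.1])

def gB (s : Int × Int × List Int) : Int × Int × List Int :=
  (s.2.1, s.1 + s.2.1, s.2.2 ++ [s.1 + s.2.1])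

theorem foldl_const {α σ : Type} (g : σ → σ) :
    ∀ (l : List α) (i : σ), l.foldl (fun s _ => g s) i = g^[l.length] i
  | [], _ => rfl
  | _ :: l, i => by
    simp [List.foldl, foldl_const g l, Function.iterate_succ_apply]

theorem sg_rec (j : Nat) :
    sg (j + 1) (fibI (j + 1)) - sg (j + 2) (fibI (j + 2)) = sg (j + 3) (fibI (j + 3)) := by
  have h3 : fibI (j + 3) = fibI (j + 1) + fibI (j + 2) := rfl
  rcases Nat.mod_two_eq_zero_or_one j with h | h
  · simp [sg, Nat.add_mod, h, h3]
  · simp [sg, Nat.add_mod, h, h3]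
    ring

theorem iterA (j : Nat) :
    gA^[j] (1, 1, 1, -1, [0, 1, 1], [1, -1]) =
      (fibI (j + 1), fibI (j + 2), sg (j + 1) (fibI (j + 1)), sg (j + 2) (fibI (j + 2)),
       (List.range (j + 3)).map fibI,
       (List.range (j + 2)).map (fun k => sg (k + 1) (fibI (k + 1)))) := by
  induction j with
  | zero => simp [fibI, sg]; decide
  | succ j ih =>
    rw [Function.iterate_succ_apply', ih]
    have h3 : fibI (j + 3) = fibI (j + 1) + fibI (j + 2) := rfl
    simp only [gA, List.range_succ, List.map_append, List.map_cons, List.map_nil,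
      Prod.mk.injEq]
    refine ⟨trivial, h3.symm, trivial, sg_rec j, ?_, ?_⟩
    · rw [← h3]
    · rw [sg_rec j]

theorem iterB (j : Nat) :
    gB^[j] (0, 1, [0, 1]) =
      (fibI j, fibI (j + 1), (List.range (j + 2)).map fibI) := by
  induction j with
  | zero => simp [fibI]; decide
  | succ j ih =>
    rw [Function.iterate_succ_apply', ih]
    have h2 : fibI (j + 2) = fibI j + fibI (j + 1) := rfl
    simp only [gB, List.range_succ, List.map_append, List.map_cons, List.map_nil,
      Prod.mk.injEq]
    refine ⟨trivial, h2.symm, ?_⟩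
    rw [← h2]

theorem enum_sign (m s : Nat) :
    (PySem.List.enumerate ((List.range' s m).map fibI) (s : Int)).map
        (fun p => if PySem.Int.mod p.1 2 = 1 then p.2 else -p.2)
      = (List.range' s m).map (fun k => sg k (fibI k)) := by
  induction m generalizing s with
  | zero => simp [PySem.List.enumerate_nil]
  | succ m ih =>
    have hmod : PySem.Int.mod (s : Int) 2 = ((s % 2 : Nat) : Int) := by
      rw [PySem.Int.mod_eq_emod_of_pos (by norm_num : (0:Int) < 2)]
      omega
    have hcast : ((s : Int) + 1) = ((s + 1 : Nat) : Int) := by push_cast; ring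
    rw [List.range'_succ, List.map_cons, PySem.List.enumerate_cons, List.map_cons,
        hcast, ih (s + 1)]
    congr 1
    simp only [hmod, sg]
    rcases Nat.mod_two_eq_zero_or_one s with h | h <;> simp [h]

-- ===== VERDICT (by name: the statement is the Claim_ definition above) =====
theorem fullFibo_spec : Claim_equal_fullFibo := by
  intro n _
  show fullFibo n = fullFibo_alt n
  have hm : (max (n - 1) 0).toNat = (n - 1 - 0).toNat := by omega
  simp only [fullFibo, fullFibo_alt]
  rw [show (fun (s : Int × Int × Int × Int × List Int × List Int) (_ : Int) =>
        (s.2.1, s.1 + s.2.1, s.2.2.2.1, s.2.2.1 - s.2.2.2.1,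
         s.2.2.2.2.1 ++ [s.1 + s.2.1], s.2.2.2.2.2 ++ [s.2.2.1 - s.2.2.2.1])) =
        (fun s (_ : Int) => gA s) from rfl,
      show (fun (s : Int × Int × List Int) (_ : Nat) =>
        (s.2.1, s.1 + s.2.1, s.2.2 ++ [s.1 + s.2.1])) = (fun s (_ : Nat) => gB s) from rfl,
      foldl_const, foldl_const, PySem.List.length_pyRange_one, List.length_range, ← hm]
  set m := (max (n - 1) 0).toNat with hmdef
  rw [iterA m, iterB (m + 1)]
  simp only
  have henum : (PySem.List.enumerate ((List.range (m + 1 + 2)).map fibI) 0).map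
        (fun p => if PySem.Int.mod p.1 2 = 1 then p.2 else -p.2)
      = (List.range (m + 3)).map (fun k => sg k (fibI k)) := by
    have := enum_sign (m + 3) 0
    simpa [List.range_eq_range'] using this
  rw [henum]
  congr 1
  -- reversed negative halves agree: drop 1 of [sg k F k | k < m+3] is the shifted list
  have hdrop : ((List.range (m + 3)).map (fun k => sg k (fibI k))).drop 1
      = (List.range (m + 2)).map (fun k => sg (k + 1) (fibI (k + 1))) := by
    have h1 : List.range (m + 3) = 0 :: (List.range (m + 2)).map (· + 1) := by
      rw [List.range_succ_eq_map]
    rw [h1]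
    simp [List.map_map, Function.comp]
  rw [hdrop]
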